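-- pv_equiv track=rewrite | github.com/pengxu9-rgb/Pivota-catalog-intelligence | ingredient-harvester/app/quality.py | _host_matches_allowlist
-- ===== SOURCE A (Python) =====
-- from typing import Any, Optional
--
-- def normalize_nonempty_string(value: Any) -> str:
--     return str(value or "").strip()
--
-- def _host_matches_allowlist(host: str, allowed_hosts: tuple[str, ...]) -> bool:
--     normalized_host = normalize_nonempty_string(host).lower()
--     if not normalized_host:
--         return False
--     for allowed_host in allowed_hosts:
--         normalized_allowed = normalize_nonempty_string(allowed_host).lower()
--         if normalized_host == normalized_allowed or normalized_host.endswith(f".{normalized_allowed}"):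
--             return True
--     return False
-- ===== SOURCE B (Python) =====
-- def _host_matches_allowlist(host, allowed_hosts):
--     allowed = {str(h or "").strip().lower() for h in allowed_hosts}
--     normalized_host = str(host or "").strip().lower()
--     if not normalized_host:
--         return False
--     if normalized_host in allowed:
--         return True
--     return any(normalized_host[i + 1:] in allowed
--                for i, c in enumerate(normalized_host) if c == '.')
-- ===== Notes on version B (the rewrite author's own statement) =====
-- stated objective: idiomatic
-- what changed: B builds a set of normalized allowlist entries once and iterates over the host's dot-suffixes checking set membership, instead of scanning every allowlist entry with endswith.
import Mathlib
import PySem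

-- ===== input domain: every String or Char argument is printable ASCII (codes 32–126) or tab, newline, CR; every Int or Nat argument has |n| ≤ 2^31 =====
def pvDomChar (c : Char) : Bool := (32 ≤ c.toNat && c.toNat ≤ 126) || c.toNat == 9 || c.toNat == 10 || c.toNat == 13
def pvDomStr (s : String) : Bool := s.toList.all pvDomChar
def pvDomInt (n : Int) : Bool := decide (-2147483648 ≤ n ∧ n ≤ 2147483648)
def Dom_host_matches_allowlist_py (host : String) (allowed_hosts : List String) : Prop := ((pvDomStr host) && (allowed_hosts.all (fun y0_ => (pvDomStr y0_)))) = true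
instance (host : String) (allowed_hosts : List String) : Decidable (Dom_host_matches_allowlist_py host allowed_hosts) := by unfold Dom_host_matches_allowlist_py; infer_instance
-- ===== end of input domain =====

-- B replaces the allowlist scan with endswith by a set of normalized entries probed with the host's dot-suffixes (idiomatic; same behaviour).
-- ===== PORT A =====
def host_matches_allowlist_py (host : String) (allowed_hosts : List String) : Bool :=
  let normalized_host := PySem.Chars.lower (PySem.Chars.strip host.toList)
  if normalized_host = [] then false
  else
    allowed_hosts.any (fun allowed_host =>
      let normalized_allowed := PySem.Chars.lower (PySem.Chars.strip allowed_host.toList)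
      decide (normalized_host = normalized_allowed) ||
        PySem.Chars.endswith normalized_host ('.' :: normalized_allowed))

-- ===== PORT B =====
-- the generator 'any(nh[i+1:] in allowed for i, c in enumerate(nh) if c == '.')': walk the chars, at each '.' probe the set with the rest
def pvDotSuffixHit (s : PySem.Set (List Char)) : List Char → Bool
  | [] => false
  | c :: rest => (c == '.' && PySem.Set.contains s rest) || pvDotSuffixHit s rest

def host_matches_allowlist_py_alt (host : String) (allowed_hosts : List String) : Bool :=
  let allowed : PySem.Set (List Char) :=
    PySem.Set.ofList (allowed_hosts.map (fun h => PySem.Chars.lower (PySem.Chars.strip h.toList)))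
  let normalized_host := PySem.Chars.lower (PySem.Chars.strip host.toList)
  if normalized_host = [] then false
  else if PySem.Set.contains allowed normalized_host then true
  else pvDotSuffixHit allowed normalized_host

-- ===== PRECONDITION & SPEC =====
def Spec_host_matches_allowlist_py (host : String) (allowed_hosts : List String) (out : Bool) : Prop := out = host_matches_allowlist_py_alt host allowed_hosts
instance (host : String) (allowed_hosts : List String) (out : Bool) : Decidable (Spec_host_matches_allowlist_py host allowed_hosts out) := by unfold Spec_host_matches_allowlist_py; infer_instance

-- ===== CLAIM (what is proved, stated in full; the proofs are below) =====
def Claim_equal_host_matches_allowlist_py : Prop := ∀ (host : String) (allowed_hosts : List String), Dom_host_matches_allowlist_py host allowed_hosts → Spec_host_matches_allowlist_py host allowed_hosts (host_matches_allowlist_py host allowed_hosts)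

-- ===== LEMMAS AND PROOFS =====

-- ===== VERDICT (by name: the statement is the Claim_ definition above) =====
lemma pvDotSuffixHit_iff (s : PySem.Set (List Char)) (l : List Char) :
    pvDotSuffixHit s l = true ↔ ∃ r, ('.' :: r) <:+ l ∧ r ∈ s := by
  induction l with
  | nil => simp [pvDotSuffixHit]
  | cons c rest ih =>
    simp [pvDotSuffixHit, ih]
    clear ih
    constructor
    · rintro (⟨hc, hm⟩ | ⟨r, hsuf, hm⟩)
      · exact ⟨rest, by simp [hc], hm⟩
      · exact ⟨r, hsuf.trans (List.suffix_cons c rest), hm⟩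
    · rintro ⟨r, hsuf, hm⟩
      rcases hsuf with ⟨p, hp⟩
      cases p with
      | nil =>
        simp only [List.nil_append, List.cons.injEq] at hp
        exact Or.inl ⟨by simp [hp.1.symm], hp.2 ▸ hm⟩
      | cons x xs =>
        simp at hp
        exact Or.inr ⟨r, ⟨xs, hp.2⟩, hm⟩

-- ===== VERDICT (by name: the statement is the Claim_ definition above) =====
theorem host_matches_allowlist_py_spec : Claim_equal_host_matches_allowlist_py := by
  intro host allowed_hosts _
  unfold Spec_host_matches_allowlist_py host_matches_allowlist_py host_matches_allowlist_py_alt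
  by_cases h : PySem.Chars.lower (PySem.Chars.strip host.toList) = []
  · simp [h]
  · simp only [h, if_false]
    set nh := PySem.Chars.lower (PySem.Chars.strip host.toList) with hnh
    rw [Bool.eq_iff_iff]
    simp only [List.any_eq_true, Bool.or_eq_true, decide_eq_true_eq,
      PySem.Chars.endswith_iff, Bool.if_true_left, PySem.Set.contains_iff,
      PySem.Set.mem_ofList, List.mem_map, pvDotSuffixHit_iff]
    constructor
    · rintro ⟨a, ha, heq | hsuf⟩
      · exact Or.inl ⟨a, ha, heq.symm⟩
      · exact Or.inr ⟨_, hsuf, ⟨a, ha, rfl⟩⟩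
    · rintro (⟨a, ha, heq⟩ | ⟨r, hsuf, a, ha, heq⟩)
      · exact ⟨a, ha, Or.inl heq.symm⟩
      · exact ⟨a, ha, Or.inr (heq ▸ hsuf)⟩
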